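-- pv_equiv track=rewrite | github.com/NicovincX2/Python-3.5 | Divers/depouillement_elect.py | gagnants_tour2_bis
-- ===== SOURCE A (Python) =====
-- def gagnants_tour2_bis(a):
--     n=len(a)
--     score_max=0
--     d=0
--     while d<n:
--         f=d
--         while f<n and a[f]==a[d]:
--             f+=1
--         if f-d>score_max:
--             score_max=f-d
--         d=f;
--     gagnants=[]
--     d=0
--     while d<n:
--         f=d
--         while f<n and a[f]==a[d]:
--             f+=1
--         if f-d==score_max:
--             gagnants.append(a[d])
--         d=f
--     return gagnants
-- ===== SOURCE B (Python) =====
-- def gagnants_tour2_bis(a):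
--     best = 0
--     cur = 0
--     prev = None
--     winners = []
--     for v in a:
--         cur = cur + 1 if (cur and v == prev) else 1
--         prev = v
--         if cur > best:
--             best = cur
--             winners = [v]
--         elif cur == best:
--             winners.append(v)
--     return winners
-- ===== Notes on version B (the rewrite author's own statement) =====
-- stated objective: alternative
-- what changed: Replaces A's two staged index-scans (one to find the maximal run length, one to collect winners) by a single online pass that maintains the current run length, the best length so far and the winners list incrementally, resetting the winners whenever a longer run appears.
import Mathlib
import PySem

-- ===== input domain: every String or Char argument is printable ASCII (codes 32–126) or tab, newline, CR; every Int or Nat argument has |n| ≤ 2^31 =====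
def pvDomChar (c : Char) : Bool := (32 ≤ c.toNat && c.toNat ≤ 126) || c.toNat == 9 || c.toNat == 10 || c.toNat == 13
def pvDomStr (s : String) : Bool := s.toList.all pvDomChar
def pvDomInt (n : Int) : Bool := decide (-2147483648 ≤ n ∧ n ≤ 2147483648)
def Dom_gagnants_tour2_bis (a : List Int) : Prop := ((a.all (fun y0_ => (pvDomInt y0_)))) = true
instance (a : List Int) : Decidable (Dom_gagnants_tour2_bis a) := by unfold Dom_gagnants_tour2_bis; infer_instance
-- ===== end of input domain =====

-- B replaces A's two staged index-scans (find max run length, then collect winners) by a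
-- single online pass keeping current run length, best so far and winners incrementally.


-- ===== PORT A =====
-- inner while: `f=d; while f<n and a[f]==a[d]: f+=1`; indices stay ≥ 0 so Nat indices are exact
def innerA (a : List Int) (n d f : Nat) : Nat :=
  if _h : f < n ∧ a[f]? = a[d]? then innerA a n d (f + 1) else f
termination_by n - f
decreasing_by omega

theorem innerA_ge (a : List Int) (n d f : Nat) : f ≤ innerA a n d f := by
  unfold innerA
  split
  · have := innerA_ge a n d (f + 1)
    omega
  · exact le_refl f
termination_by n - f
decreasing_by
  rename_i h; omega

theorem innerA_gt (a : List Int) (n d : Nat) (h : d < n) : d < innerA a n d d := by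
  rw [innerA]
  have hc : d < n ∧ a[d]? = a[d]? := ⟨h, rfl⟩
  rw [dif_pos hc]
  have := innerA_ge a n d (d + 1)
  omega

-- first while loop: computes score_max
def loop1 (a : List Int) (n d scoreMax : Nat) : Nat :=
  if h : d < n then
    let f := innerA a n d d
    loop1 a n f (if f - d > scoreMax then f - d else scoreMax)
  else scoreMax
termination_by n - d
decreasing_by
  have := innerA_gt a n d h; omega

-- second while loop: collects the winners
def loop2 (a : List Int) (n d scoreMax : Nat) (gagnants : List Int) : List Int :=
  if h : d < n then
    let f := innerA a n d d
    loop2 a n f scoreMax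
      (if f - d = scoreMax then gagnants ++ [a[d]?.getD 0] else gagnants)
  else gagnants
termination_by n - d
decreasing_by
  have := innerA_gt a n d h; omega

def gagnants_tour2_bis (a : List Int) : List Int :=
  let n := a.length
  let scoreMax := loop1 a n 0 0
  loop2 a n 0 scoreMax []

-- ===== PORT B =====
-- state: (prev, cur, best, winners); one step = body of B's for-loop
def stepB (st : Option Int × Nat × Nat × List Int) (v : Int) : Option Int × Nat × Nat × List Int :=
  let cur := if st.2.1 ≠ 0 ∧ some v = st.1 then st.2.1 + 1 else 1
  let best := st.2.2.1
  let ws := st.2.2.2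
  if cur > best then (some v, cur, cur, [v])
  else if cur = best then (some v, cur, best, ws ++ [v])
  else (some v, cur, best, ws)

def gagnants_tour2_bis_alt (a : List Int) : List Int :=
  (a.foldl stepB (none, 0, 0, [])).2.2.2

-- ===== PRECONDITION & SPEC =====
def Spec_gagnants_tour2_bis (a : List Int) (out : List Int) : Prop := out = gagnants_tour2_bis_alt a
instance (a : List Int) (out : List Int) : Decidable (Spec_gagnants_tour2_bis a out) := by unfold Spec_gagnants_tour2_bis; infer_instance

-- ===== CLAIM (what is proved, stated in full; the proofs are below) =====
def Claim_equal_gagnants_tour2_bis : Prop := ∀ (a : List Int), Dom_gagnants_tour2_bis a → Spec_gagnants_tour2_bis a (gagnants_tour2_bis a)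

-- ===== LEMMAS AND PROOFS =====
-- proof-only: the (value, run-length) decomposition both programs are compared through
def runsOf : List Int → List (Int × Nat)
  | [] => []
  | x :: xs =>
      (x, (xs.takeWhile (· == x)).length + 1) :: runsOf (xs.dropWhile (· == x))
termination_by l => l.length
decreasing_by
  simpa using Nat.lt_succ_of_le (List.length_dropWhile_le _ _)

theorem drop_eq_nil_ge (a : List Int) (f : Nat) (h : a.drop f = []) : a.length ≤ f := by
  by_contra hlt
  have : (a.drop f).length = a.length - f := List.length_drop ..
  rw [h] at this
  simp at this
  omega

theorem dropWhile_eq_drop (p : Int → Bool) : ∀ xs : List Int,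
    xs.drop (xs.takeWhile p).length = xs.dropWhile p
  | [] => rfl
  | x :: xs => by
    by_cases h : p x
    · simp [List.takeWhile, List.dropWhile, h, dropWhile_eq_drop p xs]
    · simp [List.takeWhile, List.dropWhile, h]

theorem drop_head (a : List Int) (d : Nat) (x : Int) (xs : List Int)
    (ht : a.drop d = x :: xs) : a[d]? = some x := by
  have h0 : (a.drop d)[0]? = a[d + 0]? := List.getElem?_drop
  simpa [ht] using h0.symm

theorem innerA_run (a : List Int) (d : Nat) (x : Int) (hx : a[d]? = some x) (f : Nat) :
    innerA a a.length d f = f + ((a.drop f).takeWhile (· == x)).length := by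
  rw [innerA]
  cases ht : a.drop f with
  | nil =>
    have hge := drop_eq_nil_ge a f ht
    have hc : ¬ (f < a.length ∧ a[f]? = a[d]?) := by omega
    rw [dif_neg hc]
    simp
  | cons y ys =>
    have hflt : f < a.length := by
      by_contra hge
      have : a.drop f = [] := List.drop_eq_nil_of_le (by omega)
      simp [this] at ht
    have hyf : a[f]? = some y := drop_head a f y ys ht
    by_cases hyx : y = x
    · have hc : f < a.length ∧ a[f]? = a[d]? := ⟨hflt, by rw [hyf, hx, hyx]⟩
      rw [dif_pos hc]
      have hdrop : a.drop (f + 1) = ys := by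
        have h2 : List.drop 1 (List.drop f a) = List.drop (f + 1) a := List.drop_drop
        rw [← h2, ht]
        rfl
      rw [innerA_run a d x hx (f + 1), hdrop]
      simp [List.takeWhile, hyx]
      omega
    · have hc : ¬ (f < a.length ∧ a[f]? = a[d]?) := by
        rintro ⟨-, heq⟩
        rw [hyf, hx] at heq
        exact hyx (by simpa using heq)
      rw [dif_neg hc]
      have hb : (y == x) = false := by simpa using hyx
      simp [List.takeWhile, hb]
termination_by a.length - f
decreasing_by omega

theorem innerA_drop (a : List Int) (d : Nat) (x : Int) (xs : List Int)
    (ht : a.drop d = x :: xs) :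
    innerA a a.length d d = d + 1 + (xs.takeWhile (· == x)).length ∧
    a.drop (innerA a a.length d d) = xs.dropWhile (· == x) := by
  have hx := drop_head a d x xs ht
  have h1 : innerA a a.length d d = d + ((a.drop d).takeWhile (· == x)).length :=
    innerA_run a d x hx d
  rw [ht] at h1
  simp only [List.takeWhile_cons, beq_self_eq_true, if_true, List.length_cons] at h1
  constructor
  · omega
  · rw [h1]
    have h2 : a.drop (d + ((xs.takeWhile (· == x)).length + 1))
        = List.drop (xs.takeWhile (· == x)).length (List.drop (d + 1) a) := by
      rw [List.drop_drop]
      congr 1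
      omega
    have h3 : a.drop (d + 1) = xs := by
      have hdd : List.drop 1 (List.drop d a) = List.drop (d + 1) a := List.drop_drop
      rw [← hdd, ht]
      rfl
    rw [h2, h3, dropWhile_eq_drop]

theorem loop1_runs (a : List Int) (d s : Nat) :
    loop1 a a.length d s = ((runsOf (a.drop d)).map Prod.snd).foldl max s := by
  rw [loop1]
  cases ht : a.drop d with
  | nil =>
    have hge := drop_eq_nil_ge a d ht
    rw [dif_neg (by omega)]
    simp [runsOf]
  | cons x xs =>
    have hdlt : d < a.length := by
      by_contra hge
      have : a.drop d = [] := List.drop_eq_nil_of_le (by omega)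
      simp [this] at ht
    rw [dif_pos hdlt]
    obtain ⟨h1, h2⟩ := innerA_drop a d x xs ht
    rw [loop1_runs a (innerA a a.length d d) _, h2]
    simp only [runsOf, List.map_cons, List.foldl_cons]
    congr 1
    rw [h1]
    have he : d + 1 + (xs.takeWhile (· == x)).length - d
        = (xs.takeWhile (· == x)).length + 1 := by omega
    rw [he, Nat.max_def]
    split_ifs <;> omega
termination_by a.length - d
decreasing_by
  have := innerA_gt a a.length d hdlt; omega

theorem loop2_runs (a : List Int) (d m : Nat) (acc : List Int) :
    loop2 a a.length d m acc =
      acc ++ (((runsOf (a.drop d)).filter (fun p => p.2 == m)).map Prod.fst) := by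
  rw [loop2]
  cases ht : a.drop d with
  | nil =>
    have hge := drop_eq_nil_ge a d ht
    rw [dif_neg (by omega)]
    simp [runsOf]
  | cons x xs =>
    have hdlt : d < a.length := by
      by_contra hge
      have : a.drop d = [] := List.drop_eq_nil_of_le (by omega)
      simp [this] at ht
    rw [dif_pos hdlt]
    obtain ⟨h1, h2⟩ := innerA_drop a d x xs ht
    have hx := drop_head a d x xs ht
    rw [loop2_runs a (innerA a a.length d d) m _, h2]
    have hfd : innerA a a.length d d - d = (xs.takeWhile (· == x)).length + 1 := by omega
    rw [hfd]
    by_cases hm : (xs.takeWhile (· == x)).length + 1 = m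
    · simp [runsOf, hm, hx]
    · simp [runsOf, hm]
termination_by a.length - d
decreasing_by
  have := innerA_gt a a.length d hdlt; omega

-- B-side: stepB aggregated over a whole run (proof-only fold over the runs decomposition)
def runStep (s : Nat × List Int) (p : Int × Nat) : Nat × List Int :=
  (max s.1 p.2, if s.1 < p.2 then [p.1] else if p.2 = s.1 then s.2 ++ [p.1] else s.2)

-- entering a run from a boundary state (head does not extend the previous run);
-- peel the run from the right so the invariant stays in terms of the pre-run state
theorem stepB_run (v : Int) : ∀ (k : Nat), 1 ≤ k → ∀ (prev : Option Int) (cur best : Nat)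
    (ws : List Int), ¬ (cur ≠ 0 ∧ some v = prev) →
    List.foldl stepB (prev, cur, best, ws) (List.replicate k v) =
      (some v, k, max best k,
        if best < k then [v] else if k = best then ws ++ [v] else ws)
  | 0, hk => by omega
  | 1, _ => by
    intro prev cur best ws hb
    simp only [List.replicate_succ, List.replicate_zero, List.foldl_cons, List.foldl_nil]
    unfold stepB
    simp only [if_neg hb]
    split_ifs with h1 h2 <;> simp_all <;> omega
  | k + 2, _ => by
    intro prev cur best ws hb
    have hrep : List.replicate (k + 2) v = List.replicate (k + 1) v ++ [v] := by
      rw [← List.replicate_succ']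
    rw [hrep, List.foldl_append, stepB_run v (k + 1) (by omega) prev cur best ws hb]
    simp only [List.foldl_cons, List.foldl_nil]
    unfold stepB
    simp only
    have hcur : (if k + 1 ≠ 0 ∧ True then k + 1 + 1 else 1) = k + 2 := by simp
    rw [hcur]
    rcases Nat.lt_trichotomy best (k + 2) with hlt | heq | hgt
    · have h1 : max best (k + 1) = k + 1 := by omega
      rw [h1, if_pos (by omega : k + 2 > k + 1), if_pos hlt]
      have h2 : max best (k + 2) = k + 2 := by omega
      rw [h2]
    · have h1 : max best (k + 1) = best := by omega
      rw [h1, if_neg (by omega : ¬ k + 2 > best), if_pos heq.symm,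
        if_neg (by omega : ¬ best < k + 1), if_neg (by omega : ¬ k + 1 = best),
        if_neg (by omega : ¬ best < k + 2), if_pos heq.symm]
      have h2 : max best (k + 2) = best := by omega
      rw [h2]
    · have h1 : max best (k + 1) = best := by omega
      rw [h1, if_neg (by omega : ¬ k + 2 > best), if_neg (by omega : ¬ k + 2 = best),
        if_neg (by omega : ¬ best < k + 1), if_neg (by omega : ¬ k + 1 = best),
        if_neg (by omega : ¬ best < k + 2), if_neg (by omega : ¬ k + 2 = best)]
      have h2 : max best (k + 2) = best := by omega
      rw [h2]

theorem takeWhile_replicate (x : Int) (xs : List Int) :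
    xs.takeWhile (· == x) = List.replicate (xs.takeWhile (· == x)).length x := by
  rw [List.eq_replicate_iff]
  exact ⟨rfl, fun b hb => by simpa using List.mem_takeWhile_imp hb⟩

-- the whole B fold, seen through the runs decomposition
theorem stepB_runsOf : ∀ (l : List Int) (prev : Option Int) (cur best : Nat) (ws : List Int),
    (∀ x xs, l = x :: xs → ¬ (cur ≠ 0 ∧ some x = prev)) →
    ((List.foldl stepB (prev, cur, best, ws) l).2.2.1,
     (List.foldl stepB (prev, cur, best, ws) l).2.2.2) =
      List.foldl runStep (best, ws) (runsOf l)
  | [], prev, cur, best, ws, _ => by simp [runsOf]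
  | x :: xs, prev, cur, best, ws, hb => by
    have hsplit : x :: xs
        = List.replicate ((xs.takeWhile (· == x)).length + 1) x ++ xs.dropWhile (· == x) := by
      rw [List.replicate_succ, List.cons_append]
      congr 1
      rw [← takeWhile_replicate, List.takeWhile_append_dropWhile]
    have hfold : List.foldl stepB (prev, cur, best, ws) (x :: xs)
        = List.foldl stepB
            (some x, (xs.takeWhile (· == x)).length + 1,
              max best ((xs.takeWhile (· == x)).length + 1),
              if best < (xs.takeWhile (· == x)).length + 1 then [x]
              else if (xs.takeWhile (· == x)).length + 1 = best then ws ++ [x] else ws)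
            (xs.dropWhile (· == x)) := by
      conv_lhs => rw [hsplit]
      rw [List.foldl_append, stepB_run x _ (by omega) prev cur best ws (hb x xs rfl)]
    rw [hfold]
    rw [stepB_runsOf (xs.dropWhile (· == x)) (some x) ((xs.takeWhile (· == x)).length + 1)
      _ _ (by
        intro y ys hy hcontra
        have hyx : y = x := Option.some.inj hcontra.2
        have := List.head?_dropWhile_not (· == x) xs
        rw [hy] at this
        simp [hyx] at this)]
    rw [show runsOf (x :: xs)
      = (x, (xs.takeWhile (· == x)).length + 1) :: runsOf (xs.dropWhile (· == x)) from by
        rw [runsOf], List.foldl_cons]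
    rfl
termination_by l => l.length
decreasing_by
  simpa using Nat.lt_succ_of_le (List.length_dropWhile_le _ _)

theorem le_foldl_max (l : List Nat) (b : Nat) : b ≤ l.foldl max b := by
  induction l generalizing b with
  | nil => simp
  | cons x xs ih => exact le_trans (le_max_left b x) (ih (max b x))

-- running max with reset-on-new-max equals filter by the final max
theorem runStep_filter : ∀ (runs : List (Int × Nat)) (b : Nat) (ws : List Int),
    List.foldl runStep (b, ws) runs =
      ((runs.map Prod.snd).foldl max b,
       (if b = (runs.map Prod.snd).foldl max b then ws else []) ++
         ((runs.filter (fun p => p.2 == (runs.map Prod.snd).foldl max b)).map Prod.fst))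
  | [], b, ws => by simp
  | (v, k) :: rest, b, ws => by
    rw [List.foldl_cons]
    have hr : runStep (b, ws) (v, k)
        = (max b k, if b < k then [v] else if k = b then ws ++ [v] else ws) := rfl
    rw [hr, runStep_filter rest (max b k) _]
    simp only [List.map_cons, List.foldl_cons]
    have hbM : max b k ≤ (rest.map Prod.snd).foldl max (max b k) := le_foldl_max _ _
    obtain ⟨M, hMg⟩ : ∃ M, (rest.map Prod.snd).foldl max (max b k) = M := ⟨_, rfl⟩
    simp only [hMg] at hbM ⊢
    refine Prod.ext rfl ?_
    simp only
    by_cases hkM : k = M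
    · have hfk : (k == M) = true := by simpa using hkM
      simp only [List.filter_cons, hfk, List.map_cons]
      by_cases hbk : b < k
      · rw [if_pos (by omega : max b k = M), if_pos hbk, if_neg (by omega : ¬ b = M)]
        simp
      · rw [if_pos (by omega : max b k = M), if_neg hbk, if_pos (by omega : k = b),
          if_pos (by omega : b = M)]
        simp
    · have hfk : (k == M) = false := by simpa using hkM
      simp only [List.filter_cons, hfk]
      by_cases hbm : b = M
      · rw [if_pos (by omega : max b k = M), if_neg (by omega : ¬ b < k),
          if_neg (by omega : ¬ k = b), if_pos hbm]
        simp
      · rw [if_neg (by omega : ¬ max b k = M), if_neg hbm]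
        simp

-- ===== VERDICT (by name: the statement is the Claim_ definition above) =====
theorem gagnants_tour2_bis_spec : Claim_equal_gagnants_tour2_bis := by
  intro a _
  unfold Spec_gagnants_tour2_bis gagnants_tour2_bis gagnants_tour2_bis_alt
  simp only
  rw [loop1_runs a 0 0, loop2_runs a 0 _ []]
  have hB := stepB_runsOf a none 0 0 [] (by intro x xs _ h; exact h.1 rfl)
  rw [runStep_filter] at hB
  simp only [List.drop_zero, List.nil_append]
  have := congrArg Prod.snd hB
  simp at this
  rw [this]
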